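-- pv_equiv track=rewrite | github.com/suresh-vuppala/interview-ignite-lab | src/data/courses/dsa/prefix-sum/prefix-sum-fundamentals/count-odd-even-subarrays/code/python/count_odd_even_subarrays.py | count_odd_even_brute
-- ===== SOURCE A (Python) =====
-- def count_odd_even_brute(nums):
--     n = len(nums)
--     count = 0
--
--     for i in range(n):
--         for j in range(i, n):
--             odd_count = 0
--             even_count = 0
--             for idx in range(i, j + 1):
--                 if nums[idx] % 2 == 1:
--                     odd_count += 1
--                 else:
--                     even_count += 1
--
--             if odd_count == even_count:
--                 count += 1
--
--     return count
-- ===== SOURCE B (Python) =====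
-- def count_odd_even_brute(nums):
--     count = 0
--     balance = 0
--     seen = {0: 1}
--     for x in nums:
--         balance += 1 if x % 2 == 1 else -1
--         count += seen.get(balance, 0)
--         seen[balance] = seen.get(balance, 0) + 1
--     return count
-- ===== Notes on version B (the rewrite author's own statement) =====
-- stated objective: faster
-- what changed: Replaced the triple nested loop over all subarrays with a single pass keeping a running odd-minus-even balance and a hash map of balance frequencies, counting zero-sum subarrays via equal prefix balances.
import Mathlib
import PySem

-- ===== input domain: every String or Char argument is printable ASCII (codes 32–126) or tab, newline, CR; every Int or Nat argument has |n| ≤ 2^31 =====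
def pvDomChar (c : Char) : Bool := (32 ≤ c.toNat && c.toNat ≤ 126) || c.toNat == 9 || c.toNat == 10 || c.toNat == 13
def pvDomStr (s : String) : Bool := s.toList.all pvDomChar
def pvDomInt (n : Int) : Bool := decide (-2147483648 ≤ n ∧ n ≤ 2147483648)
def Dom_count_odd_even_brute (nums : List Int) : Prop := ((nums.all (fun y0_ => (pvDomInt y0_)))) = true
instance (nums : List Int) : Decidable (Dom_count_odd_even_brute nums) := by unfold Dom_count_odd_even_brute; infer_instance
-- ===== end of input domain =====

-- B replaces A's triple nested loop over all subarrays by a single pass with a running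
-- odd-minus-even balance and a dictionary of balance frequencies (equal-prefix-balance pairs).

-- ===== PORT A =====
-- innermost loop body: 'if nums[idx] % 2 == 1: odd_count += 1 else: even_count += 1'
def istep (nums : List Int) (p : Int × Int) (idx : Int) : Int × Int :=
  if PySem.Int.mod (PySem.List.pyGetD nums idx 0) 2 = 1 then (p.1 + 1, p.2) else (p.1, p.2 + 1)

-- body of the middle loop over j: compute (odd_count, even_count) for nums[i..j], bump count on tie
def jbody (nums : List Int) (i : Int) (count j : Int) : Int :=
  let oe := (PySem.List.pyRange i (j + 1) 1).foldl (istep nums) (0, 0)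
  if oe.1 = oe.2 then count + 1 else count

-- middle loop: 'for j in range(i, n)'
def row (nums : List Int) (i : Int) (count : Int) : Int :=
  (PySem.List.pyRange i (nums.length : Int) 1).foldl (jbody nums i) count

def count_odd_even_brute (nums : List Int) : Int :=
  (PySem.List.pyRange 0 (nums.length : Int) 1).foldl (fun count i => row nums i count) 0

-- ===== PORT B =====
-- loop body of B: state = (balance, count, seen)
def bstep (st : Int × Int × PySem.Dict Int Int) (x : Int) : Int × Int × PySem.Dict Int Int :=
  let b := st.1 + (if PySem.Int.mod x 2 = 1 then 1 else -1)
  let c := st.2.1 + st.2.2.getD b 0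
  (b, c, st.2.2.insert b (st.2.2.getD b 0 + 1))

def count_odd_even_brute_alt (nums : List Int) : Int :=
  (nums.foldl bstep (0, 0, PySem.Dict.empty.insert 0 1)).2.1

-- ===== PRECONDITION & SPEC =====
def Spec_count_odd_even_brute (nums : List Int) (out : Int) : Prop := out = count_odd_even_brute_alt nums
instance (nums : List Int) (out : Int) : Decidable (Spec_count_odd_even_brute nums out) := by unfold Spec_count_odd_even_brute; infer_instance

-- ===== CLAIM (what is proved, stated in full; the proofs are below) =====
def Claim_equal_count_odd_even_brute : Prop := ∀ (nums : List Int), Dom_count_odd_even_brute nums → Spec_count_odd_even_brute nums (count_odd_even_brute nums)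

-- ===== LEMMAS AND PROOFS =====

-- odd = +1, even = -1
def bal (x : Int) : Int := if PySem.Int.mod x 2 = 1 then 1 else -1

-- prefix balances of xs starting from (but excluding) b
def tpfx : Int → List Int → List Int
  | _, [] => []
  | b, x :: xs => (b + bal x) :: tpfx (b + bal x) xs

-- Int-valued occurrence count
def cnt (a : Int) : List Int → Int
  | [] => 0
  | y :: ys => (if y = a then 1 else 0) + cnt a ys

def balsum : List Int → Int
  | [] => 0
  | y :: ys => bal y + balsum ys

def oddc : List Int → Int
  | [] => 0
  | y :: ys => (if PySem.Int.mod y 2 = 1 then 1 else 0) + oddc ys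

def evenc : List Int → Int
  | [] => 0
  | y :: ys => (if PySem.Int.mod y 2 = 1 then 0 else 1) + evenc ys

-- structural form of A's count: row i = zeros among the prefix balances of nums[i:]
def specS : List Int → Int
  | [] => 0
  | x :: xs => cnt 0 (tpfx 0 (x :: xs)) + specS xs

-- pairs (k, l), k < l, with equal values: counted by earlier endpoint
def eqP : List Int → Int
  | [] => 0
  | t :: T => cnt t T + eqP T

-- equal pairs with first component in L (already seen) or both in T, counted left to right
def eqPW : List Int → List Int → Int
  | _, [] => 0
  | L, t :: T => cnt t L + eqPW (L ++ [t]) T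

def cross : List Int → List Int → Int
  | _, [] => 0
  | L, t :: T => cnt t L + cross L T

theorem cnt_append_singleton (a w : Int) (L : List Int) :
    cnt a (L ++ [w]) = cnt a L + (if a = w then 1 else 0) := by
  induction L with
  | nil =>
    simp only [List.nil_append, cnt]
    by_cases h : a = w
    · subst h; simp
    · rw [if_neg h, if_neg (fun hh => h hh.symm)]
  | cons y ys ih => simp [cnt, ih]; ring

-- ---------- A-side ----------

theorem pyRange_succ_shift (a b : Int) :
    PySem.List.pyRange (a + 1) (b + 1) 1 = (PySem.List.pyRange a b 1).map (· + 1) := by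
  rw [PySem.List.pyRange_one, PySem.List.pyRange_one]
  have h : (b + 1 - (a + 1)) = b - a := by ring
  rw [h, List.map_map]
  apply List.map_congr_left
  intro k _
  simp
  ring

theorem pyGetD_cons_shift (x : Int) (xs : List Int) (i : Int) (h : 0 ≤ i) :
    PySem.List.pyGetD (x :: xs) (i + 1) 0 = PySem.List.pyGetD xs i 0 := by
  obtain ⟨k, rfl⟩ := Int.eq_ofNat_of_zero_le h
  have h1 : ((k : Int) + 1) = ((k + 1 : Nat) : Int) := by push_cast; ring
  rw [h1, PySem.List.pyGetD_natCast, PySem.List.pyGetD_natCast]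
  rfl

theorem istep_shift (x : Int) (xs : List Int) (p : Int × Int) (i : Int) (h : 0 ≤ i) :
    istep (x :: xs) p (i + 1) = istep xs p i := by
  simp [istep, pyGetD_cons_shift x xs i h]

theorem inner_shift (x : Int) (xs : List Int) (i j : Int) (h : 0 ≤ i) :
    (PySem.List.pyRange (i + 1) (j + 1) 1).foldl (istep (x :: xs)) (0, 0)
      = (PySem.List.pyRange i j 1).foldl (istep xs) (0, 0) := by
  rw [pyRange_succ_shift, List.foldl_map]
  apply PySem.List.foldl_congr_mem
  intro acc idx hm
  have := (PySem.List.mem_pyRange_one.mp hm).1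
  exact istep_shift x xs acc idx (le_trans h this)

theorem jbody_shift (x : Int) (xs : List Int) (i c j : Int) (h : 0 ≤ i) :
    jbody (x :: xs) (i + 1) c (j + 1) = jbody xs i c j := by
  simp only [jbody, inner_shift x xs i (j + 1) h]

theorem row_shift (x : Int) (xs : List Int) (i c : Int) (h : 0 ≤ i) :
    row (x :: xs) (i + 1) c = row xs i c := by
  unfold row
  have hlen : ((x :: xs).length : Int) = (xs.length : Int) + 1 := by
    push_cast [List.length_cons]; ring
  rw [hlen, pyRange_succ_shift, List.foldl_map]
  apply PySem.List.foldl_congr_mem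
  intro acc j _
  exact jbody_shift x xs i acc j h

theorem row_add (nums : List Int) (i c : Int) : row nums i c = c + row nums i 0 := by
  unfold row jbody
  rw [PySem.List.foldl_ite_add_one, PySem.List.foldl_ite_add_one]
  ring

theorem outer_add (xs : List Int) (l : List Int) (c : Int) :
    l.foldl (fun c i => row xs i c) c = c + l.foldl (fun c i => row xs i c) 0 := by
  induction l generalizing c with
  | nil => simp
  | cons j l ih =>
    simp only [List.foldl_cons]
    rw [ih, ih (row xs j 0), row_add]
    ring

-- innermost loop over a full prefix = (oddc, evenc) of that prefix
theorem innerList (l : List Int) (a b : Int) :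
    l.foldl (fun (p : Int × Int) y => if PySem.Int.mod y 2 = 1 then (p.1 + 1, p.2) else (p.1, p.2 + 1)) (a, b)
      = (a + oddc l, b + evenc l) := by
  induction l generalizing a b with
  | nil => simp [oddc, evenc]
  | cons y ys ih =>
    simp only [List.foldl_cons, oddc, evenc]
    split_ifs with h <;> rw [ih] <;> simp <;> omega

theorem oddc_sub_evenc (l : List Int) : oddc l - evenc l = balsum l := by
  induction l with
  | nil => simp [oddc, evenc, balsum]
  | cons y ys ih =>
    simp only [oddc, evenc, balsum, bal]
    split_ifs with h <;> omega

theorem pyGetD_take (nums : List Int) (m : Nat) (i : Int) (h0 : 0 ≤ i) (h1 : i < (m : Int)) :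
    PySem.List.pyGetD nums i 0 = PySem.List.pyGetD (nums.take m) i 0 := by
  obtain ⟨k, rfl⟩ := Int.eq_ofNat_of_zero_le h0
  rw [PySem.List.pyGetD_natCast, PySem.List.pyGetD_natCast]
  have hk : k < m := by exact_mod_cast h1
  simp [List.getD, hk]

theorem inner_eq_counts (nums : List Int) (j : Int) (h0 : 0 ≤ j) (h1 : j < (nums.length : Int)) :
    (PySem.List.pyRange 0 (j + 1) 1).foldl (istep nums) (0, 0)
      = (oddc (nums.take (j + 1).toNat), evenc (nums.take (j + 1).toNat)) := by
  have step1 : (PySem.List.pyRange 0 (j + 1) 1).foldl (istep nums) (0, 0)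
      = (PySem.List.pyRange 0 (j + 1) 1).foldl (istep (nums.take (j + 1).toNat)) (0, 0) := by
    apply PySem.List.foldl_congr_mem
    intro acc idx hm
    obtain ⟨hl, hr⟩ := PySem.List.mem_pyRange_one.mp hm
    simp [istep, pyGetD_take nums (j + 1).toNat idx hl (by omega)]
  rw [step1]
  have hlen : ((nums.take (j + 1).toNat).length : Int) = j + 1 := by
    simp [List.length_take]
    omega
  generalize nums.take (j + 1).toNat = l at hlen ⊢
  rw [← hlen]
  have h2 := PySem.List.foldl_pyRange_zero_pyGetD' l 0
      (fun (p : Int × Int) y => if PySem.Int.mod y 2 = 1 then (p.1 + 1, p.2) else (p.1, p.2 + 1)) ((0 : Int), (0 : Int))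
  have h3 : istep l = fun (acc : Int × Int) (j : Int) =>
      (fun (p : Int × Int) y => if PySem.Int.mod y 2 = 1 then (p.1 + 1, p.2) else (p.1, p.2 + 1))
        acc (PySem.List.pyGetD l j 0) := rfl
  rw [h3, h2, innerList]
  simp

-- the j-loop for row 0, generalized over a starting balance t
theorem rowJ (xs : List Int) (t c : Int) :
    (PySem.List.pyRange 0 (xs.length : Int) 1).foldl
      (fun c j => if t + balsum (xs.take (j + 1).toNat) = 0 then c + 1 else c) c
      = c + cnt 0 (tpfx t xs) := by
  induction xs generalizing t c with
  | nil => simp [tpfx, cnt]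
  | cons y ys ih =>
    have hn : (0 : Int) < ((y :: ys).length : Int) := by push_cast [List.length_cons]; omega
    have hlen : ((y :: ys).length : Int) = (ys.length : Int) + 1 := by
      push_cast [List.length_cons]; ring
    rw [PySem.List.pyRange_one_cons hn]
    simp only [List.foldl_cons]
    rw [hlen, pyRange_succ_shift, List.foldl_map]
    have hbody : ∀ (c j : Int), j ∈ PySem.List.pyRange 0 (ys.length : Int) 1 →
        (if t + balsum ((y :: ys).take (j + 1 + 1).toNat) = 0 then c + 1 else c)
          = (if (t + bal y) + balsum (ys.take (j + 1).toNat) = 0 then c + 1 else c) := by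
      intro c j hm
      obtain ⟨hl, _⟩ := PySem.List.mem_pyRange_one.mp hm
      have ht : (j + 1 + 1).toNat = (j + 1).toNat + 1 := by omega
      have harith : t + balsum ((y :: ys).take (j + 1 + 1).toNat)
          = (t + bal y) + balsum (ys.take (j + 1).toNat) := by
        rw [ht, List.take_succ_cons]
        simp only [balsum]
        ring
      rw [harith]
    rw [PySem.List.foldl_congr_mem _ _ _ _ hbody, ih]
    have ht1 : (y :: ys).take ((0 : Int) + 1).toNat = [y] := rfl
    rw [ht1]
    simp only [tpfx, cnt, balsum]
    split_ifs <;> omega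

theorem row_zero (nums : List Int) : row nums 0 0 = cnt 0 (tpfx 0 nums) := by
  unfold row
  have hbody : ∀ (c j : Int), j ∈ PySem.List.pyRange 0 (nums.length : Int) 1 →
      jbody nums 0 c j = (if (0 : Int) + balsum (nums.take (j + 1).toNat) = 0 then c + 1 else c) := by
    intro c j hm
    obtain ⟨hl, hr⟩ := PySem.List.mem_pyRange_one.mp hm
    simp only [jbody]
    rw [inner_eq_counts nums j hl hr]
    have hbs := oddc_sub_evenc (nums.take (j + 1).toNat)
    split_ifs <;> simp at * <;> omega
  rw [PySem.List.foldl_congr_mem _ _ _ _ hbody, rowJ]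
  omega

theorem A_eq_specS (nums : List Int) : count_odd_even_brute nums = specS nums := by
  induction nums with
  | nil => rfl
  | cons x xs ih =>
    unfold count_odd_even_brute
    have hn : (0 : Int) < ((x :: xs).length : Int) := by push_cast [List.length_cons]; omega
    have hlen : ((x :: xs).length : Int) = (xs.length : Int) + 1 := by
      push_cast [List.length_cons]; ring
    rw [PySem.List.pyRange_one_cons hn]
    simp only [List.foldl_cons]
    rw [hlen, pyRange_succ_shift, List.foldl_map]
    have hbody : ∀ (c i : Int), i ∈ PySem.List.pyRange 0 (xs.length : Int) 1 →
        row (x :: xs) (i + 1) c = row xs i c := by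
      intro c i hm
      exact row_shift x xs i c (PySem.List.mem_pyRange_one.mp hm).1
    rw [PySem.List.foldl_congr_mem _ _ _ _ hbody, outer_add]
    have hA : List.foldl (fun c i => row xs i c) 0 (PySem.List.pyRange 0 (xs.length : Int) 1)
        = count_odd_even_brute xs := rfl
    rw [hA, ih, row_zero, specS]

-- ---------- B-side ----------

theorem bfold (xs : List Int) (L : List Int) (b c : Int) (d : PySem.Dict Int Int)
    (hd : ∀ v, d.getD v 0 = cnt v L) :
    (xs.foldl bstep (b, c, d)).2.1 = c + eqPW L (tpfx b xs) := by
  induction xs generalizing L b c d with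
  | nil => simp [tpfx, eqPW]
  | cons x xs ih =>
    simp only [List.foldl_cons]
    have hb : bstep (b, c, d) x = (b + bal x, c + cnt (b + bal x) L,
        d.insert (b + bal x) (cnt (b + bal x) L + 1)) := by
      simp [bstep, bal, hd]
    rw [hb]
    have hd' : ∀ v, (d.insert (b + bal x) (cnt (b + bal x) L + 1)).getD v 0
        = cnt v (L ++ [b + bal x]) := by
      intro v
      rw [PySem.Dict.getD_insert, cnt_append_singleton]
      split_ifs with h1
      · subst h1; omega
      · rw [hd]; omega
    rw [ih (L ++ [b + bal x]) (b + bal x) _ _ hd']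
    simp only [tpfx, eqPW]
    ring

theorem cross_nil (T : List Int) : cross [] T = 0 := by
  induction T with
  | nil => rfl
  | cons t T ih => simp [cross, cnt, ih]

theorem cross_append_singleton (L T : List Int) (w : Int) :
    cross (L ++ [w]) T = cross L T + cnt w T := by
  induction T generalizing L with
  | nil => simp [cross, cnt]
  | cons t T ih =>
    simp only [cross, cnt, ih, cnt_append_singleton]
    split_ifs with h1
    · omega
    · omega

theorem eqPW_eq_cross_add_eqP (T L : List Int) : eqPW L T = cross L T + eqP T := by
  induction T generalizing L with
  | nil => simp [eqPW, cross, eqP]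
  | cons t T ih =>
    simp only [eqPW, cross, eqP, ih, cross_append_singleton]
    ring

theorem B_eq_eqP (nums : List Int) :
    count_odd_even_brute_alt nums = eqP (0 :: tpfx 0 nums) := by
  unfold count_odd_even_brute_alt
  have hd : ∀ v, (PySem.Dict.empty.insert (0 : Int) (1 : Int)).getD v 0 = cnt v [0] := by
    intro v
    rw [PySem.Dict.getD_insert]
    by_cases h : v = 0
    · subst h; simp [cnt]
    · rw [if_neg h, PySem.Dict.getD_empty]
      simp only [cnt]
      rw [if_neg (fun hh => h hh.symm)]
      rfl
  rw [bfold nums [0] 0 0 _ hd]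
  have h1 : (0 : Int) + eqPW [0] (tpfx 0 nums) = eqPW [] ((0 : Int) :: tpfx 0 nums) := by
    simp [eqPW, cnt]
  rw [h1, eqPW_eq_cross_add_eqP, cross_nil]
  omega

-- ---------- shift invariance and the bridge ----------

theorem tpfx_shift (xs : List Int) (b t : Int) : tpfx (b + t) xs = (tpfx t xs).map (b + ·) := by
  induction xs generalizing t with
  | nil => rfl
  | cons y ys ih =>
    simp only [tpfx, List.map_cons]
    have h : b + t + bal y = b + (t + bal y) := by ring
    rw [h, ih]

theorem cnt_shift (l : List Int) (b a : Int) : cnt (b + a) (l.map (b + ·)) = cnt a l := by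
  induction l with
  | nil => rfl
  | cons y ys ih =>
    simp only [List.map_cons, cnt, ih]
    split_ifs <;> omega

theorem eqP_shift (l : List Int) (b : Int) : eqP (l.map (b + ·)) = eqP l := by
  induction l with
  | nil => rfl
  | cons t T ih => simp only [List.map_cons, eqP, ih, cnt_shift]

theorem specS_eq_eqP (xs : List Int) : specS xs = eqP (0 :: tpfx 0 xs) := by
  induction xs with
  | nil => rfl
  | cons x xs ih =>
    rw [specS, eqP, ih]
    have h2 : tpfx 0 (x :: xs) = ((0 : Int) :: tpfx 0 xs).map (bal x + ·) := by
      simp only [tpfx, List.map_cons]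
      rw [show (0 : Int) + bal x = bal x + 0 from by ring, tpfx_shift]
    rw [h2, eqP_shift]

-- ===== VERDICT (by name: the statement is the Claim_ definition above) =====
theorem count_odd_even_brute_spec : Claim_equal_count_odd_even_brute := by
  intro nums _
  unfold Spec_count_odd_even_brute
  rw [A_eq_specS, B_eq_eqP, specS_eq_eqP]
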